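-- pv_equiv track=rewrite | github.com/0verLighT/2025-NSI | 27/25-NSI-27.py | verifie
-- ===== SOURCE A (Python) =====
-- def verifie(tab):
--     if not tab:
--         return True
--     lastV = tab[0]
--     for i in range(1, len(tab)):
--         if tab[i] < lastV:
--             return False
--     return True
-- ===== SOURCE B (Python) =====
-- def verifie(tab):
--     if not tab:
--         return True
--     return sorted(tab)[0] >= tab[0]
-- ===== Notes on version B (the rewrite author's own statement) =====
-- stated objective: alternative
-- what changed: Replaces A's early-exit linear scan with a sort-then-compare: B sorts the list and compares the smallest element (head of the sorted list) against the first element, correct because 'all elements at least the first' holds iff the global minimum is at least the first element.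
import Mathlib
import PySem

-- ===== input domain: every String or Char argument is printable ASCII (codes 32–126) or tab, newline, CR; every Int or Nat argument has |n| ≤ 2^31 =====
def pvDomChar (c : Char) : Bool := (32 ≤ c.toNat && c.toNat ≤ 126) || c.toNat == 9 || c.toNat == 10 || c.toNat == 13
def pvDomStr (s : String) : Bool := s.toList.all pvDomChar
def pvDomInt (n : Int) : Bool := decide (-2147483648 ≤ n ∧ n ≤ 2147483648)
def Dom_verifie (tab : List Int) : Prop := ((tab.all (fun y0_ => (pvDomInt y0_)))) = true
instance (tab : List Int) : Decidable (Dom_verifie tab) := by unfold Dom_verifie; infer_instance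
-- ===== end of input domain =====

-- B replaces A's early-exit scan by sorting the list and comparing the sorted head with the first element; objective: alternative.
-- ===== PORT A =====
-- the loop body: for each remaining element (tab[i] for i = 1..len-1), return False if it is < lastV
def verifieGo (lastV : Int) : List Int → Bool
  | [] => true
  | x :: rest => if x < lastV then false else verifieGo lastV rest

def verifie (tab : List Int) : Bool :=
  match tab with
  | [] => true
  | lastV :: rest => verifieGo lastV rest

-- ===== PORT B =====
def verifie_alt (tab : List Int) : Bool :=
  match tab with
  | [] => true
  | v :: _ =>
    -- sorted(tab)[0]: tab is nonempty here, so sorted tab is nonempty and the [0] access is total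
    match PySem.List.sorted tab (fun x => x) false with
    | [] => true  -- unreachable: sorted of a nonempty list is nonempty
    | m :: _ => decide (m ≥ v)

-- ===== PRECONDITION & SPEC =====
def Spec_verifie (tab : List Int) (out : Bool) : Prop := out = verifie_alt tab
instance (tab : List Int) (out : Bool) : Decidable (Spec_verifie tab out) := by unfold Spec_verifie; infer_instance

-- ===== CLAIM (what is proved, stated in full; the proofs are below) =====
def Claim_equal_verifie : Prop := ∀ (tab : List Int), Dom_verifie tab → Spec_verifie tab (verifie tab)

-- ===== LEMMAS AND PROOFS =====

-- ===== VERDICT (by name: the statement is the Claim_ definition above) =====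
-- verifieGo lastV rest is true iff every element of rest is ≥ lastV
theorem verifieGo_eq_all (lastV : Int) (rest : List Int) :
    verifieGo lastV rest = rest.all (fun x => decide (lastV ≤ x)) := by
  induction rest with
  | nil => rfl
  | cons x t ih =>
    simp only [verifieGo, List.all_cons, ih]
    split_ifs with h <;> simp <;> omega

theorem verifie_spec : Claim_equal_verifie := by
  intro tab _
  unfold Spec_verifie verifie verifie_alt
  cases tab with
  | nil => rfl
  | cons v rest =>
    cases hs : PySem.List.sorted (v :: rest) (fun x => x) false with
    | nil =>
      have hlen := PySem.List.length_sorted (v :: rest) (fun x => x) false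
      rw [hs] at hlen; simp at hlen
    | cons m t =>
      have hle : ∀ y ∈ v :: rest, m ≤ y :=
        PySem.List.key_head_sorted_le (xs := v :: rest) (key := fun x => x) hs
      have hmem : m ∈ v :: rest := by
        have : m ∈ PySem.List.sorted (v :: rest) (fun x => x) false := by simp [hs]
        exact (PySem.List.mem_sorted _ _ _ _).mp this
      show verifieGo v rest = decide (m ≥ v)
      rw [verifieGo_eq_all]
      by_cases h : v ≤ m
      · rw [decide_eq_true (by exact h)]
        simp only [List.all_eq_true, decide_eq_true_eq]
        intro x hx
        exact le_trans h (hle x (List.mem_cons_of_mem v hx))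
      · rw [decide_eq_false h]
        rcases List.mem_cons.mp hmem with hm | hm
        · omega
        · simp only [List.all_eq_false]
          exact ⟨m, hm, by simpa using fun hv => h hv⟩
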